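-- pv_equiv track=rewrite | github.com/SiwyKrzysiek/distributed-multiplication | klient.py | split_to_ranges
-- ===== SOURCE A (Python) =====
-- from typing import List, Tuple, Iterable
-- import math
--
-- def split_to_ranges(vector_lenght: int, range_count: int) -> List[Tuple[int, int]]:
--     """
--     Divide single range into rangeCount parts. Each part takes form of [a, b)
--     Example: splitIntoRanges(10, 3) => [0, 4), [4, 8), [8, 10)
--     """
--     part_size = math.ceil(vector_lenght / range_count)
--
--     ranges = []
--     index = 0
--     for _ in range(range_count):
--         if index < vector_lenght:
--             r = index, min(index + part_size, vector_lenght)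
--
--             ranges.append(r)
--             index = r[1]
--         else:  # There are more ranges than vector length
--             ranges.append((0, 0))
--
--     return ranges
-- ===== SOURCE B (Python) =====
-- import math
--
-- def split_to_ranges(vector_lenght, range_count):
--     part_size = math.ceil(vector_lenght / range_count)
--     if part_size > 0:
--         cuts = list(range(0, vector_lenght, part_size)) + [vector_lenght]
--         ranges = list(zip(cuts, cuts[1:]))
--     else:
--         ranges = []
--     return ranges + [(0, 0)] * (range_count - len(ranges))
-- ===== Notes on version B (the rewrite author's own statement) =====
-- stated objective: alternative
-- what changed: B replaces A's stateful append loop by staged passes: it builds the list of cut points with range(0, n, part_size), zips it with its own tail to form the real parts, then pads with (0,0) copies up to range_count.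
-- outside the precondition, e.g. on split_to_ranges(0, 0): A raises ZeroDivisionError, B raises ZeroDivisionError
import Mathlib
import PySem

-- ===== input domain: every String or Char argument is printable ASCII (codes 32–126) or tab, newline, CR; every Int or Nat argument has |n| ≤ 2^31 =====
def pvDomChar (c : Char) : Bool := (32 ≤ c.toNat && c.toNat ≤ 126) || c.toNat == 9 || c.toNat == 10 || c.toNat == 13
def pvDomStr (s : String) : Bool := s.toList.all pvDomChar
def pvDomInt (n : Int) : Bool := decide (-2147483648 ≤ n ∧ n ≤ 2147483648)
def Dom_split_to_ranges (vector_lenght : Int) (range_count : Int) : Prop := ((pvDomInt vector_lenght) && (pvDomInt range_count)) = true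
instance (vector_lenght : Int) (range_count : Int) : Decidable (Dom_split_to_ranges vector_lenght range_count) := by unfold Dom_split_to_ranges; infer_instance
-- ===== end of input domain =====

-- B replaces A's stateful append loop by staged passes: build the cut points with
-- range(0, n, part_size), zip the cut list with its own tail, pad with (0,0) copies.

-- math.ceil(vector_lenght / range_count): ceiling division -((-a) // b); exact on Dom,
-- where |a| ≤ 2^31 keeps float true-division within ulp distance of the rational quotient.
def pyCeilDiv (a b : Int) : Int := -(PySem.Int.floordiv (-a) b)

-- ===== PORT A =====
def split_to_ranges (vector_lenght : Int) (range_count : Int) : List (Int × Int) :=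
  let part_size := pyCeilDiv vector_lenght range_count
  let st := (PySem.List.pyRange 0 range_count 1).foldl
    (fun (s : List (Int × Int) × Int) _ =>
      if s.2 < vector_lenght then
        (s.1 ++ [(s.2, min (s.2 + part_size) vector_lenght)],
         min (s.2 + part_size) vector_lenght)
      else
        (s.1 ++ [(0, 0)], s.2))
    ([], 0)
  st.1

-- ===== PORT B =====
def split_to_ranges_alt (vector_lenght : Int) (range_count : Int) : List (Int × Int) :=
  let part_size := pyCeilDiv vector_lenght range_count
  let ranges :=
    if 0 < part_size then
      let cuts := PySem.List.pyRange 0 vector_lenght part_size ++ [vector_lenght]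
      cuts.zip (PySem.List.slice cuts (some 1) none)
    else []
  ranges ++ PySem.List.pyRepeat [(0, 0)] (range_count - ranges.length)

-- ===== PRECONDITION & SPEC =====
-- Pre_ excludes only range_count = 0, where Python A (and B) raise ZeroDivisionError.
def Pre_split_to_ranges (vector_lenght : Int) (range_count : Int) : Prop := range_count ≠ 0
instance (vector_lenght : Int) (range_count : Int) : Decidable (Pre_split_to_ranges vector_lenght range_count) := by unfold Pre_split_to_ranges; infer_instance
def pvWitness_split_to_ranges : Int × Int := (10, 3)

def Spec_split_to_ranges (vector_lenght : Int) (range_count : Int) (out : List (Int × Int)) : Prop := out = split_to_ranges_alt vector_lenght range_count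
instance (vector_lenght : Int) (range_count : Int) (out : List (Int × Int)) : Decidable (Spec_split_to_ranges vector_lenght range_count out) := by unfold Spec_split_to_ranges; infer_instance

-- ===== CLAIM (what is proved, stated in full; the proofs are below) =====
def Claim_equal_split_to_ranges : Prop := ∀ (vector_lenght : Int) (range_count : Int), Dom_split_to_ranges vector_lenght range_count → Pre_split_to_ranges vector_lenght range_count → Spec_split_to_ranges vector_lenght range_count (split_to_ranges vector_lenght range_count)

-- ===== LEMMAS AND PROOFS =====

-- Reference recursion: the sequence of pairs A's loop emits from index s in n iterations.
def goParts (L ps : Int) : Int → Nat → List (Int × Int)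
  | _, 0 => []
  | s, n + 1 =>
    if s < L then (s, min (s + ps) L) :: goParts L ps (min (s + ps) L) n
    else (0, 0) :: goParts L ps s n

-- A's foldl equals the reference recursion (the loop body ignores the loop variable).
lemma foldA_eq_goParts (L ps : Int) :
    ∀ (l : List Int) (acc : List (Int × Int)) (s : Int),
      (l.foldl
        (fun (t : List (Int × Int) × Int) _ =>
          if t.2 < L then (t.1 ++ [(t.2, min (t.2 + ps) L)], min (t.2 + ps) L)
          else (t.1 ++ [(0, 0)], t.2))
        (acc, s)).1 = acc ++ goParts L ps s l.length := by
  intro l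
  induction l with
  | nil => intro acc s; simp [goParts]
  | cons x xs ih =>
    intro acc s
    simp only [List.foldl_cons, List.length_cons]
    by_cases h : s < L
    · rw [if_pos h, ih]
      simp [goParts, if_pos h]
    · rw [if_neg h, ih]
      simp [goParts, if_neg h]

-- Once the index has reached L, every remaining iteration emits (0, 0).
lemma goParts_ge (L ps : Int) : ∀ (n : Nat) (s : Int), ¬ s < L →
    goParts L ps s n = List.replicate n (0, 0) := by
  intro n
  induction n with
  | zero => intro s _; simp [goParts]
  | succ n ih =>
    intro s h
    simp [goParts, if_neg h, ih s h, List.replicate_succ]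

-- pyRange with a positive step: nil and cons forms.
lemma pyRange_pos_nil (a b s : Int) (hs : 0 < s) (h : b ≤ a) :
    PySem.List.pyRange a b s = [] := by
  rw [PySem.List.pyRange_of_pos _ _ hs, if_neg (by omega)]
  simp

lemma pyRange_pos_cons (a b s : Int) (hs : 0 < s) (h : a < b) :
    PySem.List.pyRange a b s = a :: PySem.List.pyRange (a + s) b s := by
  rw [PySem.List.pyRange_of_pos _ _ hs, PySem.List.pyRange_of_pos _ _ hs, if_pos h]
  have hd : (b - a + s - 1) / s = (if a + s < b then (b - (a + s) + s - 1) / s else 0) + 1 := by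
    by_cases h2 : a + s < b
    · rw [if_pos h2]
      have : b - a + s - 1 = (b - (a + s) + s - 1) + 1 * s := by ring
      rw [this, Int.add_mul_ediv_right _ _ (by omega)]
    · rw [if_neg h2]
      have h1 : PySem.Int.floordiv (b - a + s - 1) s = 1 :=
        (PySem.Int.floordiv_eq_iff_of_pos hs).mpr ⟨by omega, by nlinarith⟩
      rw [← PySem.Int.floordiv_eq_ediv_of_pos hs, h1]
      omega
  rw [hd]
  have hnn : 0 ≤ (if a + s < b then (b - (a + s) + s - 1) / s else 0) := by
    by_cases h2 : a + s < b
    · rw [if_pos h2]; exact Int.ediv_nonneg (by omega) (by omega)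
    · rw [if_neg h2]
  rw [Int.toNat_add hnn (by omega)]
  have hXY : (if a + s < b then (b - (a + s) + s - 1) / s else 0).toNat
      = (if a + s < b then ((b - (a + s) + s - 1) / s).toNat else 0) := by
    split_ifs <;> simp
  rw [← hXY]
  simp only [Int.toNat_one, List.range_succ_eq_map, List.map_cons, List.map_map]
  congr 1
  · ring_nf
  · apply List.map_congr_left
    intro k _
    simp [Function.comp]
    ring

-- Main bridge: while the index is below L, the loop's output is the zip of the cut
-- list with its own tail, followed by (0,0)-padding.
lemma goParts_zip (L ps : Int) (hps : 0 < ps) :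
    ∀ (n : Nat) (s : Int), s < L → L ≤ s + n * ps →
      goParts L ps s n =
        (let cuts := PySem.List.pyRange s L ps ++ [L]
         cuts.zip cuts.tail) ++
        List.replicate (n - (PySem.List.pyRange s L ps).length) (0, 0) := by
  intro n
  induction n with
  | zero => intro s h1 h2; omega
  | succ n ih =>
    intro s h1 h2
    rw [pyRange_pos_cons s L ps hps h1]
    by_cases h3 : s + ps < L
    · have := ih (s + ps) h3 (by push_cast at h2 ⊢; nlinarith)
      rw [pyRange_pos_cons (s + ps) L ps hps h3] at this ⊢
      simp only [goParts, if_pos h1, min_eq_left h3.le, List.cons_append, List.zip_cons_cons,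
        List.tail_cons, List.length_cons] at this ⊢
      rw [this]
      simp
    · have hmin : min (s + ps) L = L := min_eq_right (by omega)
      rw [pyRange_pos_nil (s + ps) L ps hps (by omega)]
      simp only [goParts, if_pos h1, hmin, List.nil_append, List.cons_append,
        List.zip_cons_cons, List.tail_cons, List.length_cons, List.length_nil]
      rw [goParts_ge L ps n L (lt_irrefl L)]
      simp

-- Ceiling-division brackets for a positive divisor.
lemma ceil_bounds (L rc : Int) (hrc : 0 < rc) :
    (pyCeilDiv L rc - 1) * rc < L ∧ L ≤ pyCeilDiv L rc * rc := by
  exact (PySem.Int.neg_floordiv_neg_eq_iff_of_pos (a := L) (b := rc)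
    (q := pyCeilDiv L rc) hrc).mp rfl

-- For a negative divisor and positive dividend, the ceiling quotient is nonpositive.
lemma ceil_nonpos_of_neg (L rc : Int) (hrc : rc < 0) (hL : 0 < L) :
    pyCeilDiv L rc ≤ 0 := by
  unfold pyCeilDiv
  have : PySem.Int.floordiv (-L) rc = PySem.Int.floordiv L (-rc) := by
    have := PySem.Int.floordiv_neg_neg L (-rc)
    simpa using this
  rw [this, PySem.Int.floordiv_eq_ediv_of_pos (by omega)]
  have : 0 ≤ L / (-rc) := Int.ediv_nonneg (by omega) (by omega)
  omega

-- ===== VERDICT (by name: the statement is the Claim_ definition above) =====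
theorem split_to_ranges_spec : Claim_equal_split_to_ranges := by
  intro L rc _ hpre
  unfold Pre_split_to_ranges at hpre
  unfold Spec_split_to_ranges split_to_ranges split_to_ranges_alt
  simp only []
  set ps := pyCeilDiv L rc with hps
  rw [foldA_eq_goParts, PySem.List.length_pyRange_one, List.nil_append]
  rw [PySem.List.slice_from _ (by omega : (0:Int) ≤ 1)]
  rcases lt_trichotomy rc 0 with hrc | hrc | hrc
  · -- rc < 0: A returns [], B returns [] too
    have hn : (rc - 0).toNat = 0 := by omega
    rw [hn]
    simp only [goParts]
    by_cases hpos : 0 < ps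
    · have hL : L ≤ 0 := by
        by_contra hc
        have := ceil_nonpos_of_neg L rc hrc (by omega)
        omega
      rw [if_pos hpos, pyRange_pos_nil 0 L ps hpos hL]
      simp [PySem.List.pyRepeat]
      omega
    · rw [if_neg hpos]
      simp [PySem.List.pyRepeat]
      omega
  · omega
  · -- rc > 0
    obtain ⟨hlo, hhi⟩ := ceil_bounds L rc hrc
    rw [← hps] at hlo hhi
    by_cases hL : 0 < L
    · have hps1 : 1 ≤ ps := by nlinarith
      have hcond : L ≤ 0 + ((rc - 0).toNat : Int) * ps := by
        have : ((rc - 0).toNat : Int) = rc := by omega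
        rw [this]; nlinarith
      have hz := goParts_zip L ps (by omega) (rc - 0).toNat 0 hL hcond
      simp only [] at hz
      rw [hz, if_pos (by omega : 0 < ps)]
      set c := PySem.List.pyRange 0 L ps with hc
      have htail : (c ++ [L]).tail = (c ++ [L]).drop (1 : Int).toNat := by
        simp [List.drop_one]
      rw [← htail]
      congr 1
      rw [PySem.List.pyRepeat_singleton]
      congr 1
      have hlen : ((c ++ [L]).zip (c ++ [L]).tail).length = c.length := by
        rw [List.length_zip]
        simp [List.length_tail]
      rw [hlen]
      have hle : (c.length : Int) ≤ rc := by
        -- each emitted pair consumes one iteration: from the proved equality's lengths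
        by_contra hgt
        push Not at hgt
        -- length of goParts is exactly n
        have hglen : ∀ (m : Nat) (s : Int), (goParts L ps s m).length = m := by
          intro m
          induction m with
          | zero => intro s; simp [goParts]
          | succ k ihk => intro s; by_cases h : s < L <;> simp [goParts, h, ihk]
        have := congrArg List.length hz
        rw [hglen] at this
        simp only [List.length_append, hlen, List.length_replicate] at this
        omega
      omega
    · have hL0 : L ≤ 0 := by omega
      have hps0 : ps ≤ 0 := by nlinarith
      rw [goParts_ge L ps _ 0 (by omega), if_neg (by omega)]
      simp [PySem.List.pyRepeat]
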